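-- pv_equiv track=rewrite | github.com/Marshal1101/DataStructure-Algorithm-Study | programmers/21_graph_02_rank.py | solution
-- ===== SOURCE A (Python) =====
-- def solution(n, results) :
--     winner_vs_idx = [[] for _ in range(n+1)]
--     loser_vs_idx = [[] for _ in range(n+1)]
--     for result in results :
--         winner, loser = result
--         winner_vs_idx[loser].append(winner)
--         loser_vs_idx[winner].append(loser)
--
--     idx_win_cnt = [0] * (n+1)
--     idx_lose_cnt = [0] * (n+1)
--
--     def count_up(i, list, cnt_list) :
--         visited = [False] * (n+1)
--         visited[i] = True
--         stack = [i]
--         while stack :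
--             idx = stack.pop()
--             for vs in list[idx] :
--                 if not visited[vs] :
--                     visited[vs] = True
--                     cnt_list[vs] += 1
--                     stack.append(vs)
--
--     for i in range(1, n+1) :
--         count_up(i, winner_vs_idx, idx_win_cnt)
--         count_up(i, loser_vs_idx, idx_lose_cnt)
--
--     result = 0
--     for i in range(1, n+1) :
--         if idx_win_cnt[i] + idx_lose_cnt[i] == n-1 :
--             result += 1
--
--     return result
-- ===== SOURCE B (Python) =====
-- def solution(n, results):
--     m = n + 1
--     reach = [[False] * m for _ in range(m)]
--     for winner, loser in results:
--         reach[winner][loser] = True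
--     for k in range(m):
--         rk = reach[k]
--         for i in range(m):
--             ri = reach[i]
--             if ri[k]:
--                 for j in range(m):
--                     if rk[j]:
--                         ri[j] = True
--     total = 0
--     for i in range(1, m):
--         known = 0
--         for j in range(1, m):
--             if j != i:
--                 known += reach[i][j] + reach[j][i]
--         if known == n - 1:
--             total += 1
--     return total
-- ===== Notes on version B (the rewrite author's own statement) =====
-- stated objective: alternative
-- what changed: replaces the per-source stack DFS that increments win/lose counters with a boolean reachability matrix closed by Floyd-Warshall, from which wins and losses are read off by row/column scans
import Mathlib
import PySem

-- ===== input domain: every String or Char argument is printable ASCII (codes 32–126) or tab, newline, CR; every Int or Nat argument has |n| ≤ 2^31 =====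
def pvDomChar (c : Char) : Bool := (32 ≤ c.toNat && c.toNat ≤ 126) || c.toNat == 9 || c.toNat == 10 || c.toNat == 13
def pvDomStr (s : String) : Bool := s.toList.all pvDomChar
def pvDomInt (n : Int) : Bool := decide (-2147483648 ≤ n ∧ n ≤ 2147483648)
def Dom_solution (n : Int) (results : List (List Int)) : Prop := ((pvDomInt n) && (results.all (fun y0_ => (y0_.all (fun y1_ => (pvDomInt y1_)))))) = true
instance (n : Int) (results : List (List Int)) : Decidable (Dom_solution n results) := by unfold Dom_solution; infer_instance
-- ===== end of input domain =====

-- B replaces A's per-source stack DFS (which increments win/lose counter arrays) by a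
-- boolean reachability matrix closed with Floyd-Warshall; wins/losses are then read off
-- by row/column scans.  Same value on every input A accepts (Pre_); no speed claim.

-- Python index for a list of length m: exact for -m ≤ i < m (Pre_ ensures this);
-- Python raises IndexError outside that range, here it clamps/overflows harmlessly.
def pvNIdx (m : Nat) (i : Int) : Nat := if i < 0 then (i + m).toNat else i.toNat

-- ===== PORT A =====

-- winner_vs_idx[i].append(v) / loser_vs_idx[i].append(v)
def pvAppendAt (xs : List (List Int)) (i : Int) (v : Int) : List (List Int) :=
  let j := pvNIdx xs.length i
  xs.set j (xs.getD j [] ++ [v])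

-- the 'for vs in list[idx]' body of count_up; stack is represented head-as-top
-- (Python append/pop work at the list end, same LIFO discipline).
def pvDfsInner (vis : List Bool) (cnt : List Int) (stk : List Int) :
    List Int → List Bool × List Int × List Int
  | [] => (vis, cnt, stk)
  | vs :: rest =>
    let j := pvNIdx vis.length vs
    if j < vis.length then
      if vis.getD j false then pvDfsInner vis cnt stk rest
      else pvDfsInner (vis.set j true) (cnt.set j (cnt.getD j 0 + 1)) (vs :: stk) rest
    else pvDfsInner vis cnt stk rest   -- Python raises IndexError here; outside Pre_

theorem pvDfsInner_measure (L : List Int) (vis : List Bool) (cnt stk : List Int) :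
    2 * (pvDfsInner vis cnt stk L).1.count false + (pvDfsInner vis cnt stk L).2.2.length
      ≤ 2 * vis.count false + stk.length := by
  induction L generalizing vis cnt stk with
  | nil => simp [pvDfsInner]
  | cons vs rest ih =>
    simp only [pvDfsInner]
    split
    · split
      · exact ih vis cnt stk
      · refine le_trans (ih _ _ _) ?_
        rename_i hlt hvis
        have hget : vis.getD (pvNIdx vis.length vs) false = false := by
          simpa using hvis
        have : (vis.set (pvNIdx vis.length vs) true).count false + 1 = vis.count false := by
          rw [List.getD_eq_getElem _ _ hlt] at hget
          have hcs := List.count_set (a := true) (b := false) (l := vis)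
            (i := pvNIdx vis.length vs) hlt
          rw [hcs, hget]
          have : 0 < vis.count false := by
            have : false ∈ vis := by
              rw [← hget]; exact List.getElem_mem hlt
            exact List.count_pos_iff.mpr this
          simp
          omega
        simp only [List.length_cons]
        omega
    · exact ih vis cnt stk

-- the 'while stack' loop of count_up
def pvDfsLoop (adj : List (List Int)) (vis : List Bool) (cnt : List Int) :
    List Int → List Bool × List Int
  | [] => (vis, cnt)
  | idx :: stk =>
    let st := pvDfsInner vis cnt stk (adj.getD (pvNIdx vis.length idx) [])
    pvDfsLoop adj st.1 st.2.1 st.2.2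
termination_by l => 2 * vis.count false + l.length
decreasing_by
  have := pvDfsInner_measure (adj.getD (pvNIdx vis.length idx) []) vis cnt stk
  simp only [List.length_cons]
  omega

-- count_up(i, adj, cnt): fresh visited with visited[i]=True, stack=[i]
def pvCountUp (m : Nat) (adj : List (List Int)) (cnt : List Int) (i : Int) : List Int :=
  ((pvDfsLoop adj ((List.replicate m false).set (pvNIdx m i) true) cnt [i])).2

-- one 'for result in results' step: unpack and append to both adjacency tables
def pvBuildStep (p : List (List Int) × List (List Int)) (r : List Int) :
    List (List Int) × List (List Int) :=
  match r with
  | [w, l] => (pvAppendAt p.1 l w, pvAppendAt p.2 w l)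
  | _ => p                        -- Python raises on a non-pair row; outside Pre_

def solution (n : Int) (results : List (List Int)) : Int :=
  let m := (n + 1).toNat
  let init : List (List Int) := (List.range m).map (fun _ => [])
  let adjs := results.foldl pvBuildStep (init, init)
  let cnts := (PySem.List.pyRange 1 (n+1) 1).foldl (fun (p : List Int × List Int) i =>
      (pvCountUp m adjs.1 p.1 i, pvCountUp m adjs.2 p.2 i))
    (List.replicate m (0:Int), List.replicate m (0:Int))
  (PySem.List.pyRange 1 (n+1) 1).foldl (fun acc i =>
      if cnts.1.getD (pvNIdx m i) 0 + cnts.2.getD (pvNIdx m i) 0 = n - 1 then acc + 1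
      else acc) 0

-- ===== PORT B =====

def pvMGet (M : List (List Bool)) (i j : Nat) : Bool := (M.getD i []).getD j false

-- reach[winner][loser] = True
def pvEdgeStep (m : Nat) (M : List (List Bool)) (r : List Int) : List (List Bool) :=
  match r with
  | [w, l] => M.set (pvNIdx m w) ((M.getD (pvNIdx m w) []).set (pvNIdx m l) true)
  | _ => M                        -- Python raises on a non-pair row; outside Pre_

-- the 'for j in range(m)' loop: ri[j] = True wherever rk[j]
def pvRowOr (m : Nat) (M : List (List Bool)) (k : Nat) (row : List Bool) : List Bool :=
  (List.range m).foldl (fun row j => if pvMGet M k j then row.set j true else row) row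

-- one 'for i in range(m)' step of Floyd-Warshall
def pvFWInnerStep (m k : Nat) (M : List (List Bool)) (i : Nat) : List (List Bool) :=
  if pvMGet M i k then M.set i (pvRowOr m M k (M.getD i [])) else M

-- one 'for k in range(m)' step
def pvFWStep (m : Nat) (M : List (List Bool)) (k : Nat) : List (List Bool) :=
  (List.range m).foldl (pvFWInnerStep m k) M

def solution_alt (n : Int) (results : List (List Int)) : Int :=
  let m := (n + 1).toNat
  let M0 : List (List Bool) := (List.range m).map (fun _ => List.replicate m false)
  let M1 := results.foldl (pvEdgeStep m) M0
  -- Floyd-Warshall transitive closure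
  let Mc := (List.range m).foldl (pvFWStep m) M1
  (PySem.List.pyRange 1 (n+1) 1).foldl (fun total i =>
    let known := (PySem.List.pyRange 1 (n+1) 1).foldl (fun known j =>
      if j ≠ i then
        known + (if pvMGet Mc (pvNIdx m i) (pvNIdx m j) then 1 else 0)
              + (if pvMGet Mc (pvNIdx m j) (pvNIdx m i) then 1 else 0)
      else known) (0 : Int)
    if known = n - 1 then total + 1 else total) 0

-- ===== PRECONDITION & SPEC =====

-- Pre_: exactly the inputs where A returns normally: every row is a pair whose two
-- entries are valid Python indices into the (n+1)-long arrays (else A raises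
-- IndexError / unpack ValueError).  For n < 0 this forces results = [].
def Pre_solution (n : Int) (results : List (List Int)) : Prop :=
  ∀ r ∈ results, r.length = 2 ∧ ∀ x ∈ r, -(n+1) ≤ x ∧ x ≤ n

instance (n : Int) (results : List (List Int)) : Decidable (Pre_solution n results) := by
  unfold Pre_solution; infer_instance

def pvWitness_solution : Int × List (List Int) := (3, [[1, 2], [2, 3], [1, 3]])

def Spec_solution (n : Int) (results : List (List Int)) (out : Int) : Prop := out = solution_alt n results
instance (n : Int) (results : List (List Int)) (out : Int) : Decidable (Spec_solution n results out) := by unfold Spec_solution; infer_instance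

-- ===== CLAIM (what is proved, stated in full; the proofs are below) =====
def Claim_equal_solution : Prop := ∀ (n : Int) (results : List (List Int)), Dom_solution n results → Pre_solution n results → Spec_solution n results (solution n results)

-- ===== LEMMAS AND PROOFS =====

-- --- generic getD/set helpers ---

theorem pv_getD_set_self {α : Type} (xs : List α) (i : Nat) (v d : α) (h : i < xs.length) :
    (xs.set i v).getD i d = v := by
  simp [List.getD_eq_getElem?_getD, h]

theorem pv_getD_set_ne {α : Type} (xs : List α) (i j : Nat) (v d : α) (h : i ≠ j) :
    (xs.set i v).getD j d = xs.getD j d := by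
  simp [List.getD_eq_getElem?_getD, List.getElem?_set_ne h]

theorem pv_getD_ge {α : Type} (xs : List α) (j : Nat) (d : α) (h : xs.length ≤ j) :
    xs.getD j d = d := by
  simp [List.getD_eq_getElem?_getD, List.getElem?_eq_none_iff.mpr h]

-- --- the normalized edge relations and pivot-bounded paths ---

-- "a beats b" through one row of results (node labels normalized into [0, m))
def pvE (m : Nat) (results : List (List Int)) (a b : Nat) : Prop :=
  ∃ w l : Int, [w, l] ∈ results ∧ pvNIdx m w = a ∧ pvNIdx m l = b

-- edge relation encoded by an adjacency table
def pvEAdj (m : Nat) (adj : List (List Int)) (a b : Nat) : Prop :=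
  ∃ v ∈ adj.getD a [], pvNIdx m v = b

-- nonempty path from i to j all of whose intermediate nodes are < k (Floyd-Warshall order)
def pvPB (E : Nat → Nat → Prop) : Nat → Nat → Nat → Prop
  | 0 => E
  | k+1 => fun i j => pvPB E k i j ∨ (pvPB E k i k ∧ pvPB E k k j)

theorem pvPB_mono (E : Nat → Nat → Prop) {k k' i j : Nat} (h : k ≤ k')
    (hp : pvPB E k i j) : pvPB E k' i j := by
  induction k', h using Nat.le_induction with
  | base => exact hp
  | succ k' _ ih => exact Or.inl ih

theorem pvPB_comp (E : Nat → Nat → Prop) :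
    ∀ {k t i j : Nat}, t < k → pvPB E k i t → pvPB E k t j → pvPB E k i j := by
  intro k
  induction k with
  | zero => intro t i j ht; omega
  | succ k ih =>
    intro t i j ht h1 h2
    by_cases hk : t = k
    · subst hk
      have h1' : pvPB E t i t := by rcases h1 with h | ⟨h, _⟩ <;> exact h
      have h2' : pvPB E t t j := by rcases h2 with h | ⟨_, h⟩ <;> exact h
      exact Or.inr ⟨h1', h2'⟩
    · have htk : t < k := by omega
      rcases h1 with h1 | ⟨ha, hb⟩
      · rcases h2 with h2 | ⟨hc, hd⟩
        · exact Or.inl (ih htk h1 h2)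
        · exact Or.inr ⟨ih htk h1 hc, hd⟩
      · rcases h2 with h2 | ⟨hc, hd⟩
        · exact Or.inr ⟨ha, ih htk hb h2⟩
        · exact Or.inr ⟨ha, hd⟩

theorem pvPB_closed {E : Nat → Nat → Prop} {S : Nat → Prop}
    (hS : ∀ a b, S a → E a b → S b) :
    ∀ {k a b : Nat}, S a → pvPB E k a b → S b := by
  intro k
  induction k with
  | zero => intro a b ha h; exact hS a b ha h
  | succ k ih =>
    intro a b ha h
    rcases h with h | ⟨h1, h2⟩
    · exact ih ha h
    · exact ih (ih ha h1) h2

theorem pvPB_flip (E : Nat → Nat → Prop) :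
    ∀ (k i j : Nat), pvPB (fun a b => E b a) k i j ↔ pvPB E k j i := by
  intro k
  induction k with
  | zero => intro i j; rfl
  | succ k ih => intro i j; simp only [pvPB, ih]; tauto

theorem pvPB_congr {E E' : Nat → Nat → Prop} (h : ∀ a b, E a b ↔ E' a b) :
    ∀ (k i j : Nat), pvPB E k i j ↔ pvPB E' k i j := by
  intro k
  induction k with
  | zero => intro i j; exact h i j
  | succ k ih => intro i j; simp only [pvPB, ih]

def pvMatOK (m : Nat) (M : List (List Bool)) : Prop :=
  M.length = m ∧ ∀ r ∈ M, r.length = m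


-- --- adjacency construction ---

theorem pvAppendAt_length (xs : List (List Int)) (i v : Int) :
    (pvAppendAt xs i v).length = xs.length := by
  simp [pvAppendAt]

theorem mem_pvAppendAt (xs : List (List Int)) (i v : Int) (a : Nat) (v' : Int)
    (ha : a < xs.length) :
    v' ∈ (pvAppendAt xs i v).getD a [] ↔
      v' ∈ xs.getD a [] ∨ (v' = v ∧ pvNIdx xs.length i = a) := by
  unfold pvAppendAt
  by_cases hj : pvNIdx xs.length i = a
  · rw [hj, pv_getD_set_self _ _ _ _ ha]
    simp
  · rw [pv_getD_set_ne _ _ _ _ _ hj]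
    simp only [iff_self_or]
    rintro ⟨-, h⟩; exact absurd h hj

theorem pvBuild_spec (m : Nat) :
    ∀ (rs : List (List Int)) (p0 : List (List Int) × List (List Int)),
    p0.1.length = m → p0.2.length = m →
    (rs.foldl pvBuildStep p0).1.length = m ∧
    (rs.foldl pvBuildStep p0).2.length = m ∧
    (∀ (a : Nat) (v : Int), a < m →
      (v ∈ (rs.foldl pvBuildStep p0).1.getD a [] ↔
        v ∈ p0.1.getD a [] ∨ ∃ w l : Int, [w, l] ∈ rs ∧ v = w ∧ pvNIdx m l = a)) ∧
    (∀ (a : Nat) (v : Int), a < m →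
      (v ∈ (rs.foldl pvBuildStep p0).2.getD a [] ↔
        v ∈ p0.2.getD a [] ∨ ∃ w l : Int, [w, l] ∈ rs ∧ v = l ∧ pvNIdx m w = a)) := by
  intro rs
  induction rs with
  | nil => intro p0 h1 h2; simp [h1, h2]
  | cons r rs ih =>
    intro p0 h1 h2
    match r with
    | [w0, l0] =>
      simp only [List.foldl_cons, pvBuildStep]
      have hl1 : (pvAppendAt p0.1 l0 w0).length = m := by rw [pvAppendAt_length]; exact h1
      have hl2 : (pvAppendAt p0.2 w0 l0).length = m := by rw [pvAppendAt_length]; exact h2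
      obtain ⟨g1, g2, g3, g4⟩ := ih (pvAppendAt p0.1 l0 w0, pvAppendAt p0.2 w0 l0) hl1 hl2
      refine ⟨g1, g2, ?_, ?_⟩
      · intro a v ha
        rw [g3 a v ha, mem_pvAppendAt _ _ _ _ _ (h1 ▸ ha)]
        rw [h1]
        simp only [List.mem_cons, List.cons.injEq, and_true]
        aesop
      · intro a v ha
        rw [g4 a v ha, mem_pvAppendAt _ _ _ _ _ (h2 ▸ ha)]
        rw [h2]
        simp only [List.mem_cons, List.cons.injEq, and_true]
        aesop
    | [] =>
      simp only [List.foldl_cons, pvBuildStep]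
      obtain ⟨g1, g2, g3, g4⟩ := ih p0 h1 h2
      refine ⟨g1, g2, ?_, ?_⟩ <;> intro a v ha
      · rw [g3 a v ha]; simp
      · rw [g4 a v ha]; simp
    | [x] =>
      simp only [List.foldl_cons, pvBuildStep]
      obtain ⟨g1, g2, g3, g4⟩ := ih p0 h1 h2
      refine ⟨g1, g2, ?_, ?_⟩ <;> intro a v ha
      · rw [g3 a v ha]; simp
      · rw [g4 a v ha]; simp
    | x :: y :: z :: t =>
      simp only [List.foldl_cons, pvBuildStep]
      obtain ⟨g1, g2, g3, g4⟩ := ih p0 h1 h2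
      refine ⟨g1, g2, ?_, ?_⟩ <;> intro a v ha
      · rw [g3 a v ha]; simp
      · rw [g4 a v ha]; simp

-- --- DFS inner loop: full characterisation of one neighbour sweep ---

theorem pvDfsInner_spec (m : Nat) :
    ∀ (L : List Int) (vis : List Bool) (cnt stk : List Int),
    vis.length = m → cnt.length = m → (∀ v ∈ L, pvNIdx m v < m) →
    ((pvDfsInner vis cnt stk L).1.length = m) ∧
    ((pvDfsInner vis cnt stk L).2.1.length = m) ∧
    (∀ x, vis.getD x false = true → (pvDfsInner vis cnt stk L).1.getD x false = true) ∧
    (∀ v ∈ L, (pvDfsInner vis cnt stk L).1.getD (pvNIdx m v) false = true) ∧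
    (∀ x, (pvDfsInner vis cnt stk L).1.getD x false = true →
       vis.getD x false = true ∨ ∃ v ∈ L, pvNIdx m v = x) ∧
    (∃ P, (pvDfsInner vis cnt stk L).2.2 = P ++ stk ∧ ∀ p ∈ P, p ∈ L) ∧
    (∀ x, x < m → (pvDfsInner vis cnt stk L).1.getD x false = true →
       vis.getD x false = false → ∃ p ∈ (pvDfsInner vis cnt stk L).2.2, pvNIdx m p = x) ∧
    (∀ x, x < m → (pvDfsInner vis cnt stk L).2.1.getD x 0 =
       cnt.getD x 0 + ((if (pvDfsInner vis cnt stk L).1.getD x false then (1:Int) else 0)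
                       - (if vis.getD x false then (1:Int) else 0))) := by
  intro L
  induction L with
  | nil =>
    intro vis cnt stk hv hc _
    refine ⟨hv, hc, ?_, ?_, ?_, ⟨[], by simp [pvDfsInner], by simp⟩, ?_, ?_⟩ <;>
      simp [pvDfsInner]
    intro x _ h1 h2; rw [h1] at h2; cases h2
  | cons vs rest ih =>
    intro vis cnt stk hv hc hLb
    have hj : pvNIdx m vs < m := hLb vs (by simp)
    have hjv : pvNIdx m vs < vis.length := by omega
    simp only [pvDfsInner, hv]
    rw [if_pos hj]
    by_cases hvis : vis.getD (pvNIdx m vs) false = true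
    · rw [if_pos hvis]
      obtain ⟨g1, g2, g3, g4, g5, ⟨P, hP, hPm⟩, g7, g8⟩ :=
        ih vis cnt stk hv hc (fun v hvm => hLb v (by simp [hvm]))
      refine ⟨g1, g2, g3, ?_, ?_, ⟨P, hP, fun p hp => by simp [hPm p hp]⟩, ?_, g8⟩
      · intro v hvm
        rcases List.mem_cons.mp hvm with rfl | hvm
        · exact g3 _ hvis
        · exact g4 v hvm
      · intro x hx
        rcases g5 x hx with h | ⟨v, hvm, hnm⟩
        · exact Or.inl h
        · exact Or.inr ⟨v, by simp [hvm], hnm⟩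
      · intro x hxm hx hfalse
        exact g7 x hxm hx hfalse
    · rw [if_neg hvis]
      have hvis' : vis.getD (pvNIdx m vs) false = false := by
        cases h : vis.getD (pvNIdx m vs) false
        · rfl
        · exact absurd h hvis
      set j := pvNIdx m vs with hjdef
      have hv' : (vis.set j true).length = m := by simpa using hv
      have hc' : (cnt.set j (cnt.getD j 0 + 1)).length = m := by simpa using hc
      obtain ⟨g1, g2, g3, g4, g5, ⟨P, hP, hPm⟩, g7, g8⟩ :=
        ih (vis.set j true) (cnt.set j (cnt.getD j 0 + 1)) (vs :: stk) hv' hc'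
          (fun v hvm => hLb v (by simp [hvm]))
      have hset : ∀ x, (vis.set j true).getD x false =
          if x = j then true else vis.getD x false := by
        intro x
        by_cases hx : x = j
        · subst hx; rw [if_pos rfl, pv_getD_set_self _ _ _ _ (by omega)]
        · rw [if_neg hx, pv_getD_set_ne _ _ _ _ _ (fun h => hx h.symm)]
      have hcset : ∀ x, (cnt.set j (cnt.getD j 0 + 1)).getD x 0 =
          if x = j then cnt.getD j 0 + 1 else cnt.getD x 0 := by
        intro x
        by_cases hx : x = j
        · subst hx; rw [if_pos rfl, pv_getD_set_self _ _ _ _ (by omega)]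
        · rw [if_neg hx, pv_getD_set_ne _ _ _ _ _ (fun h => hx h.symm)]
      refine ⟨g1, g2, ?_, ?_, ?_, ?_, ?_, ?_⟩
      · intro x hx
        refine g3 x ?_
        rw [hset]; split
        · rfl
        · exact hx
      · intro v hvm
        rcases List.mem_cons.mp hvm with rfl | hvm
        · exact g3 _ (by rw [hset, if_pos rfl])
        · exact g4 v hvm
      · intro x hx
        rcases g5 x hx with h | ⟨v, hvm, hnm⟩
        · rw [hset] at h
          by_cases hxj : x = j
          · exact Or.inr ⟨vs, by simp, hxj ▸ rfl⟩
          · rw [if_neg hxj] at h; exact Or.inl h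
        · exact Or.inr ⟨v, by simp [hvm], hnm⟩
      · exact ⟨P ++ [vs], by simpa using hP, fun p hp => by
          rcases List.mem_append.mp hp with h | h
          · simp [hPm p h]
          · simp at h; simp [h]⟩
      · intro x hxm hx hfalse
        by_cases hxj : x = j
        · refine ⟨vs, ?_, hxj ▸ rfl⟩
          rw [hP]; simp
        · refine g7 x hxm hx ?_
          rw [hset, if_neg hxj]; exact hfalse
      · intro x hxm
        rw [g8 x hxm, hcset, hset]
        by_cases hxj : x = j
        · subst hxj
          rw [hvis']
          have hvt : (pvDfsInner (vis.set j true) (cnt.set j (cnt.getD j 0 + 1)) (vs :: stk)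
              rest).1.getD j false = true := g3 j (by rw [hset, if_pos rfl])
          rw [hvt]
          simp
        · rw [if_neg hxj, if_neg hxj]

-- --- DFS outer loop ---

theorem pvDfsLoop_spec (m : Nat) (adj : List (List Int))
    (hadj : ∀ (a : Nat) (v : Int), v ∈ adj.getD a [] → pvNIdx m v < m)
    (i0 : Nat) (hi0 : i0 < m) (cnt0 : List Int) :
    ∀ (vis : List Bool) (cnt stk : List Int),
    vis.length = m → cnt.length = m →
    vis.getD i0 false = true →
    (∀ s ∈ stk, vis.getD (pvNIdx m s) false = true ∧ pvNIdx m s < m) →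
    (∀ x, x < m → vis.getD x false = true → x = i0 ∨ pvPB (pvEAdj m adj) m i0 x) →
    (∀ u, u < m → vis.getD u false = true →
       (∀ w, pvEAdj m adj u w → vis.getD w false = true) ∨ ∃ s ∈ stk, pvNIdx m s = u) →
    (∀ x, x < m → cnt.getD x 0 = cnt0.getD x 0 +
       (if vis.getD x false = true ∧ x ≠ i0 then (1:Int) else 0)) →
    (∀ x, x < m → ((pvDfsLoop adj vis cnt stk).1.getD x false = true ↔
        (x = i0 ∨ pvPB (pvEAdj m adj) m i0 x))) ∧
    (∀ x, x < m → (pvDfsLoop adj vis cnt stk).2.getD x 0 = cnt0.getD x 0 +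
       (if (pvDfsLoop adj vis cnt stk).1.getD x false = true ∧ x ≠ i0 then (1:Int) else 0)) ∧
    (pvDfsLoop adj vis cnt stk).2.length = m := by
  intro vis cnt stk
  induction vis, cnt, stk using pvDfsLoop.induct (adj := adj) with
  | case1 vis cnt =>
    intro hv hc hroot _ hsound hfront hcnt
    have hchar : ∀ x, x < m → (vis.getD x false = true ↔ (x = i0 ∨ pvPB (pvEAdj m adj) m i0 x)) := by
      intro x hxm
      constructor
      · exact hsound x hxm
      · have hS : ∀ a b, (a < m ∧ vis.getD a false = true) → pvEAdj m adj a b →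
            (b < m ∧ vis.getD b false = true) := by
          intro a b ⟨ham, hav⟩ heb
          obtain ⟨v, hvmem, rfl⟩ := heb
          refine ⟨hadj a v hvmem, ?_⟩
          rcases hfront a ham hav with hcl | ⟨s, hs, _⟩
          · exact hcl _ ⟨v, hvmem, rfl⟩
          · cases hs
        rintro (rfl | hpb)
        · exact hroot
        · exact (pvPB_closed hS ⟨hi0, hroot⟩ hpb).2
    simp only [pvDfsLoop]
    exact ⟨hchar, hcnt, hc⟩
  | case2 vis cnt vs rest st ih =>
    intro hv hc hroot hstk hsound hfront hcnt
    obtain ⟨hu, hum⟩ := hstk vs (by simp)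
    have hLb : ∀ v ∈ adj.getD (pvNIdx m vs) [], pvNIdx m v < m :=
      fun v hvm => hadj _ v hvm
    obtain ⟨g1, g2, g3, g4, g5, ⟨P, hP, hPm⟩, g7, g8⟩ :=
      pvDfsInner_spec m (adj.getD (pvNIdx m vs) []) vis cnt rest hv hc hLb
    have hrec : pvDfsLoop adj vis cnt (vs :: rest) =
        pvDfsLoop adj (pvDfsInner vis cnt rest (adj.getD (pvNIdx m vs) [])).1
          (pvDfsInner vis cnt rest (adj.getD (pvNIdx m vs) [])).2.1
          (pvDfsInner vis cnt rest (adj.getD (pvNIdx m vs) [])).2.2 := by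
      conv_lhs => rw [pvDfsLoop]
      rw [hv]
    rw [hrec]
    have ih' := ih
    rw [show st = pvDfsInner vis cnt rest (adj.getD (pvNIdx vis.length vs) []) from rfl] at ih'
    simp only [hv] at ih'
    refine ih' g1 g2 (g3 _ hroot) ?_ ?_ ?_ ?_
    · -- stack invariant
      intro s hs
      rw [hP] at hs
      rcases List.mem_append.mp hs with hsP | hsr
      · exact ⟨g4 s (hPm s hsP), hLb s (hPm s hsP)⟩
      · obtain ⟨h1, h2⟩ := hstk s (by simp [hsr])
        exact ⟨g3 _ h1, h2⟩
    · -- soundness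
      intro x hxm hx
      rcases g5 x hx with hvx | ⟨v, hvL, hnm⟩
      · exact hsound x hxm hvx
      · have hedge : pvEAdj m adj (pvNIdx m vs) x := ⟨v, hvL, hnm⟩
        have hpbe : pvPB (pvEAdj m adj) m (pvNIdx m vs) x :=
          pvPB_mono (pvEAdj m adj) (Nat.zero_le m) hedge
        rcases hsound _ hum hu with heq | hpb
        · exact Or.inr (heq ▸ hpbe)
        · exact Or.inr (pvPB_comp _ hum hpb hpbe)
    · -- frontier
      intro u' hum' hu'
      by_cases huu : u' = pvNIdx m vs
      · subst huu
        refine Or.inl ?_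
        rintro w ⟨v, hvL, rfl⟩
        exact g4 v hvL
      · by_cases hvx : vis.getD u' false = true
        · rcases hfront u' hum' hvx with hcl | ⟨s, hs, hnm⟩
          · exact Or.inl (fun w hew => g3 _ (hcl w hew))
          · rcases List.mem_cons.mp hs with rfl | hsr
            · exact absurd hnm.symm huu
            · exact Or.inr ⟨s, by rw [hP]; exact List.mem_append.mpr (Or.inr hsr), hnm⟩
        · have hvx' : vis.getD u' false = false := by
            cases h : vis.getD u' false
            · rfl
            · exact absurd h hvx
          obtain ⟨p, hp, hnp⟩ := g7 u' hum' hu' hvx'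
          exact Or.inr ⟨p, hp, hnp⟩
    · -- counter invariant
      intro x hxm
      rw [g8 x hxm, hcnt x hxm]
      by_cases hx0 : x = i0
      · subst hx0
        rw [g3 _ hroot, hroot]
        simp
      · cases hvt : vis.getD x false
        · cases hst : (pvDfsInner vis cnt rest (adj.getD (pvNIdx m vs) [])).1.getD x false <;>
            simp [hx0, hst]
        · rw [g3 _ hvt]
          simp [hx0]

-- --- Bool mirror of pvPB (for decidable counting) ---

def pvPBb (E : Nat → Nat → Bool) : Nat → Nat → Nat → Bool
  | 0 => E
  | k+1 => fun i j => pvPBb E k i j || (pvPBb E k i k && pvPBb E k k j)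

theorem pvPBb_iff (E : Nat → Nat → Bool) :
    ∀ (k i j : Nat), pvPBb E k i j = true ↔ pvPB (fun a b => E a b = true) k i j := by
  intro k
  induction k with
  | zero => intro i j; rfl
  | succ k ih => intro i j; simp only [pvPBb, pvPB, Bool.or_eq_true, Bool.and_eq_true, ih]

def pvEAdjb (m : Nat) (adj : List (List Int)) (a b : Nat) : Bool :=
  (adj.getD a []).any (fun v => pvNIdx m v == b)

theorem pvEAdjb_iff (m : Nat) (adj : List (List Int)) (a b : Nat) :
    pvEAdjb m adj a b = true ↔ pvEAdj m adj a b := by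
  simp [pvEAdjb, pvEAdj]

def pvReach (m : Nat) (adj : List (List Int)) (a b : Nat) : Bool :=
  pvPBb (pvEAdjb m adj) m a b

theorem pvReach_iff (m : Nat) (adj : List (List Int)) (a b : Nat) :
    pvReach m adj a b = true ↔ pvPB (pvEAdj m adj) m a b := by
  rw [pvReach, pvPBb_iff]
  exact pvPB_congr (fun a b => pvEAdjb_iff m adj a b) m a b

-- --- count_up ---

theorem pvCountUp_spec (m : Nat) (adj : List (List Int))
    (hadj : ∀ (a : Nat) (v : Int), v ∈ adj.getD a [] → pvNIdx m v < m)
    (cnt : List Int) (hc : cnt.length = m) (i : Int) (hi : 0 ≤ i) (him : i < (m:Int)) :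
    (pvCountUp m adj cnt i).length = m ∧
    (∀ x, x < m → (pvCountUp m adj cnt i).getD x 0 = cnt.getD x 0 +
      (if pvReach m adj i.toNat x && !(x == i.toNat) then (1:Int) else 0)) := by
  have hi0m : i.toNat < m := by omega
  have hnm : pvNIdx m i = i.toNat := by simp [pvNIdx]; omega
  have hvlen : ((List.replicate m false).set (pvNIdx m i) true).length = m := by simp
  have hset : ∀ x, ((List.replicate m false).set (pvNIdx m i) true).getD x false =
      if x = i.toNat then true else false := by
    intro x
    rw [hnm]
    by_cases hx : x = i.toNat
    · subst hx; rw [if_pos rfl, pv_getD_set_self _ _ _ _ (by simpa using hi0m)]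
    · rw [if_neg hx, pv_getD_set_ne _ _ _ _ _ (fun h => hx h.symm)]
      cases Nat.lt_or_ge x m with
      | inl h => simp [List.getD_eq_getElem?_getD, List.getElem?_replicate, h]
      | inr h => exact pv_getD_ge _ _ _ (by simpa using h)
  obtain ⟨hchar, hcnt, hlen⟩ :=
    pvDfsLoop_spec m adj hadj i.toNat hi0m cnt
      ((List.replicate m false).set (pvNIdx m i) true) cnt [i]
      hvlen hc
      (by rw [hset, if_pos rfl])
      (by intro s hs
          simp only [List.mem_singleton] at hs
          subst hs
          exact ⟨by rw [hset, hnm, if_pos rfl], by rw [hnm]; exact hi0m⟩)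
      (by intro x _ hx
          rw [hset] at hx
          by_cases hxe : x = i.toNat
          · exact Or.inl hxe
          · rw [if_neg hxe] at hx; cases hx)
      (by intro u _ hu
          rw [hset] at hu
          by_cases hue : u = i.toNat
          · exact Or.inr ⟨i, by simp, by rw [hnm, hue]⟩
          · rw [if_neg hue] at hu; cases hu)
      (by intro x _
          rw [hset]
          by_cases hxe : x = i.toNat
          · simp [hxe]
          · simp [hxe])
  refine ⟨hlen, ?_⟩
  intro x hxm
  rw [pvCountUp, hcnt x hxm]
  congr 1
  by_cases hxe : x = i.toNat
  · simp [hxe]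
  · by_cases hpb : pvPB (pvEAdj m adj) m i.toNat x
    · have h1 : (pvDfsLoop adj ((List.replicate m false).set (pvNIdx m i) true) cnt [i]).1.getD x false = true :=
        (hchar x hxm).mpr (Or.inr hpb)
      have h2 : pvReach m adj i.toNat x = true := (pvReach_iff _ _ _ _).mpr hpb
      have hb : (pvReach m adj i.toNat x && !(x == i.toNat)) = true := by
        simp [h2, hxe]
      rw [if_pos ⟨h1, hxe⟩, if_pos hb]
    · have h1 : ¬ (pvDfsLoop adj ((List.replicate m false).set (pvNIdx m i) true) cnt [i]).1.getD x false = true := by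
        intro h
        rcases (hchar x hxm).mp h with h' | h'
        · exact hxe h'
        · exact hpb h'
      have h2 : ¬ pvReach m adj i.toNat x = true := fun h => hpb ((pvReach_iff _ _ _ _).mp h)
      have hb : ¬ ((pvReach m adj i.toNat x && !(x == i.toNat)) = true) := by
        intro hcontra
        exact h2 (And.left (by simpa using hcontra))
      rw [if_neg (fun hcontra => h1 hcontra.1), if_neg hb]

-- --- source fold: accumulate counters over all sources ---

theorem pvSrcFold_spec (m : Nat) (a1 a2 : List (List Int))
    (hadj1 : ∀ (a : Nat) (v : Int), v ∈ a1.getD a [] → pvNIdx m v < m)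
    (hadj2 : ∀ (a : Nat) (v : Int), v ∈ a2.getD a [] → pvNIdx m v < m) :
    ∀ (S : List Int) (c1 c2 : List Int), c1.length = m → c2.length = m →
    (∀ i ∈ S, 0 ≤ i ∧ i < (m:Int)) →
    ((S.foldl (fun (p : List Int × List Int) i =>
        (pvCountUp m a1 p.1 i, pvCountUp m a2 p.2 i)) (c1, c2)).1.length = m) ∧
    ((S.foldl (fun (p : List Int × List Int) i =>
        (pvCountUp m a1 p.1 i, pvCountUp m a2 p.2 i)) (c1, c2)).2.length = m) ∧
    (∀ x, x < m →
      (S.foldl (fun (p : List Int × List Int) i =>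
        (pvCountUp m a1 p.1 i, pvCountUp m a2 p.2 i)) (c1, c2)).1.getD x 0 =
          c1.getD x 0 + (S.countP (fun i => pvReach m a1 i.toNat x && !(x == i.toNat)) : Int) ∧
      (S.foldl (fun (p : List Int × List Int) i =>
        (pvCountUp m a1 p.1 i, pvCountUp m a2 p.2 i)) (c1, c2)).2.getD x 0 =
          c2.getD x 0 + (S.countP (fun i => pvReach m a2 i.toNat x && !(x == i.toNat)) : Int)) := by
  intro S
  induction S with
  | nil => intro c1 c2 h1 h2 _; simp [h1, h2]
  | cons i S ih =>
    intro c1 c2 h1 h2 hS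
    obtain ⟨hi0, him⟩ := hS i (by simp)
    obtain ⟨u1len, u1⟩ := pvCountUp_spec m a1 hadj1 c1 h1 i hi0 him
    obtain ⟨u2len, u2⟩ := pvCountUp_spec m a2 hadj2 c2 h2 i hi0 him
    obtain ⟨g1, g2, g3⟩ := ih (pvCountUp m a1 c1 i) (pvCountUp m a2 c2 i) u1len u2len
      (fun j hj => hS j (by simp [hj]))
    refine ⟨g1, g2, ?_⟩
    intro x hxm
    obtain ⟨e1, e2⟩ := g3 x hxm
    simp only [List.foldl_cons] at *
    rw [e1, e2, u1 x hxm, u2 x hxm]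
    rw [List.countP_cons, List.countP_cons]
    push_cast
    constructor
    · by_cases hb : (pvReach m a1 i.toNat x && !(x == i.toNat)) = true
      · simp [hb]; ring
      · simp [hb]
    · by_cases hb : (pvReach m a2 i.toNat x && !(x == i.toNat)) = true
      · simp [hb]; ring
      · simp [hb]

-- --- B side: matrix lemmas ---

theorem pv_getD_const_nil (m a : Nat) :
    ((List.range m).map (fun _ => ([] : List Int))).getD a [] = [] := by
  have hrep : (List.range m).map (fun _ => ([] : List Int)) =
      List.replicate m ([] : List Int) := by simp
  rw [hrep]
  rcases Nat.lt_or_ge a m with h | h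
  · exact List.getD_replicate _ h
  · exact pv_getD_ge _ _ _ (by simpa using h)

theorem pvM0_matOK (m : Nat) :
    pvMatOK m ((List.range m).map (fun _ => List.replicate m false)) := by
  constructor
  · simp
  · intro r hr
    simp only [List.mem_map] at hr
    obtain ⟨_, _, rfl⟩ := hr
    simp

theorem pvM0_get (m a b : Nat) :
    pvMGet ((List.range m).map (fun _ => List.replicate m false)) a b = false := by
  have hrep : (List.range m).map (fun _ => List.replicate m false) =
      List.replicate m (List.replicate m false) := by simp
  rw [pvMGet, hrep]
  rcases Nat.lt_or_ge a m with h | h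
  · rw [List.getD_replicate _ h]
    rcases Nat.lt_or_ge b m with hb | hb
    · rw [List.getD_replicate _ hb]
    · exact pv_getD_ge _ _ _ (by simpa using hb)
  · rw [pv_getD_ge (List.replicate m (List.replicate m false)) a [] (by simpa using h)]
    rfl

theorem pvE_cons (m : Nat) (r : List Int) (rs : List (List Int)) (a b : Nat) :
    pvE m (r :: rs) a b ↔
      (∃ w l : Int, r = [w, l] ∧ pvNIdx m w = a ∧ pvNIdx m l = b) ∨ pvE m rs a b := by
  simp only [pvE, List.mem_cons]
  aesop

theorem pvEdge_spec (m : Nat) :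
    ∀ (rs : List (List Int)) (M : List (List Bool)), pvMatOK m M →
    pvMatOK m (rs.foldl (pvEdgeStep m) M) ∧
    (∀ a b, a < m → b < m →
      (pvMGet (rs.foldl (pvEdgeStep m) M) a b = true ↔
        pvMGet M a b = true ∨ pvE m rs a b)) := by
  intro rs
  induction rs with
  | nil =>
    intro M hM
    refine ⟨hM, ?_⟩
    intro a b _ _
    simp [pvE]
  | cons r rs ih =>
    intro M hM
    have hstep : ∀ (M' : List (List Bool)), pvMatOK m M' →
        pvMatOK m (pvEdgeStep m M' r) ∧
        (∀ a b, a < m → b < m →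
          (pvMGet (pvEdgeStep m M' r) a b = true ↔
            pvMGet M' a b = true ∨
              ∃ w l : Int, r = [w, l] ∧ pvNIdx m w = a ∧ pvNIdx m l = b)) := by
      intro M' hM'
      match r with
      | [] => exact ⟨hM', by intro a b _ _; simp [pvEdgeStep]⟩
      | [x] => exact ⟨hM', by intro a b _ _; simp [pvEdgeStep]⟩
      | x :: y :: z :: t => exact ⟨hM', by intro a b _ _; simp [pvEdgeStep]⟩
      | [w, l] =>
        simp only [pvEdgeStep]
        rcases Nat.lt_or_ge (pvNIdx m w) m with hiw | hiw
        · have hlt : pvNIdx m w < M'.length := by rw [hM'.1]; exact hiw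
          have hrowlen : (M'.getD (pvNIdx m w) []).length = m := by
            refine hM'.2 _ ?_
            rw [List.getD_eq_getElem?_getD, List.getElem?_eq_getElem hlt]
            simp only [Option.getD_some]
            exact List.getElem_mem hlt
          constructor
          · constructor
            · simp [hM'.1]
            · intro r' hr'
              rcases List.mem_or_eq_of_mem_set hr' with h | rfl
              · exact hM'.2 _ h
              · rw [List.length_set]; exact hrowlen
          · intro a b ha hb
            by_cases haw : a = pvNIdx m w
            · subst haw
              rw [pvMGet, pv_getD_set_self _ _ _ _ hlt]
              by_cases hbl : b = pvNIdx m l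
              · subst hbl
                rw [pv_getD_set_self _ _ _ _ (by rw [hrowlen]; exact hb)]
                simp
              · rw [pv_getD_set_ne _ _ _ _ _ (fun h => hbl h.symm)]
                rw [show (M'.getD (pvNIdx m w) []).getD b false = pvMGet M' (pvNIdx m w) b from rfl]
                constructor
                · exact Or.inl
                · rintro (h | ⟨w', l', heq, hwa, hlb⟩)
                  · exact h
                  · simp only [List.cons.injEq, and_true] at heq
                    rw [← heq.2] at hlb
                    exact absurd hlb.symm hbl
            · rw [pvMGet, pv_getD_set_ne _ _ _ _ _ (fun h => haw h.symm)]
              rw [show (M'.getD a []).getD b false = pvMGet M' a b from rfl]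
              constructor
              · exact Or.inl
              · rintro (h | ⟨w', l', heq, hwa, hlb⟩)
                · exact h
                · simp only [List.cons.injEq, and_true] at heq
                  rw [← heq.1] at hwa
                  exact absurd hwa.symm haw
        · have hnoop : M'.set (pvNIdx m w) ((M'.getD (pvNIdx m w) []).set (pvNIdx m l) true) = M' := by
            apply List.set_eq_of_length_le
            rw [hM'.1]; exact hiw
          rw [hnoop]
          refine ⟨hM', ?_⟩
          intro a b ha hb
          constructor
          · exact Or.inl
          · rintro (h | ⟨w', l', heq, hwa, hlb⟩)
            · exact h
            · simp only [List.cons.injEq, and_true] at heq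
              rw [← heq.1] at hwa
              omega
    obtain ⟨h1, h2⟩ := hstep M hM
    obtain ⟨g1, g2⟩ := ih (pvEdgeStep m M r) h1
    refine ⟨g1, ?_⟩
    intro a b ha hb
    rw [List.foldl_cons, g2 a b ha hb, h2 a b ha hb, pvE_cons, or_assoc]

-- --- Floyd-Warshall lemmas ---

theorem pv_rowfold (g : Nat → Bool) :
    ∀ (L : List Nat) (row : List Bool), (∀ x ∈ L, x < row.length) →
    ((L.foldl (fun row j => if g j then row.set j true else row) row).length = row.length) ∧
    (∀ j, (L.foldl (fun row j => if g j then row.set j true else row) row).getD j false =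
      (row.getD j false || (decide (j ∈ L) && g j))) := by
  intro L
  induction L with
  | nil => intro row _; simp
  | cons j0 L ih =>
    intro row hL
    have hj0 : j0 < row.length := hL j0 (by simp)
    have hrow' : (if g j0 then row.set j0 true else row).length = row.length := by
      split <;> simp
    obtain ⟨ih1, ih2⟩ := ih (if g j0 then row.set j0 true else row)
      (fun x hx => by rw [hrow']; exact hL x (by simp [hx]))
    rw [List.foldl_cons]
    refine ⟨by rw [ih1, hrow'], ?_⟩
    intro j
    rw [ih2 j]
    have hstep : (if g j0 then row.set j0 true else row).getD j false =
        (row.getD j false || (decide (j = j0) && g j0)) := by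
      by_cases hg : g j0 = true
      · rw [if_pos hg, hg]
        by_cases hjj : j = j0
        · subst hjj; rw [pv_getD_set_self _ _ _ _ hj0]; simp
        · rw [pv_getD_set_ne _ _ _ _ _ (fun h => hjj h.symm)]; simp [hjj]
      · have : g j0 = false := by cases h : g j0; rfl; exact absurd h hg
        rw [if_neg hg, this]; simp
    rw [hstep]
    by_cases h1 : j = j0 <;> by_cases h2 : j ∈ L <;>
      cases h3 : g j <;> cases h4 : g j0 <;> cases h5 : row.getD j false <;>
        simp [h1, h2, h3, h4, h5] <;> simp_all

theorem pvFWInnerStep_char (m k : Nat) (M : List (List Bool)) (hM : pvMatOK m M)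
    (i0 : Nat) (hi0 : i0 < m) :
    pvMatOK m (pvFWInnerStep m k M i0) ∧
    (∀ a b, a < m → b < m →
      pvMGet (pvFWInnerStep m k M i0) a b =
        (pvMGet M a b || (decide (a = i0) && pvMGet M a k && pvMGet M k b))) := by
  have hlt : i0 < M.length := by rw [hM.1]; exact hi0
  have hrowmem : M.getD i0 [] ∈ M := by
    rw [List.getD_eq_getElem?_getD, List.getElem?_eq_getElem hlt]
    simp only [Option.getD_some]
    exact List.getElem_mem hlt
  have hrowlen : (M.getD i0 []).length = m := hM.2 _ hrowmem
  by_cases hc : pvMGet M i0 k = true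
  · have hro := pv_rowfold (fun j => pvMGet M k j) (List.range m) (M.getD i0 [])
      (fun x hx => by rw [hrowlen]; simpa using hx)
    constructor
    · constructor
      · simp only [pvFWInnerStep, hc, if_pos]
        simp [hM.1]
      · intro r' hr'
        simp only [pvFWInnerStep, hc, if_pos] at hr'
        rcases List.mem_or_eq_of_mem_set hr' with h | rfl
        · exact hM.2 _ h
        · rw [show pvRowOr m M k (M.getD i0 []) =
              (List.range m).foldl (fun row j => if pvMGet M k j then row.set j true else row)
                (M.getD i0 []) from rfl, hro.1]
          exact hrowlen
    · intro a b ha hb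
      simp only [pvFWInnerStep, hc, if_pos]
      by_cases hai : a = i0
      · subst hai
        rw [pvMGet, pv_getD_set_self _ _ _ _ hlt]
        rw [show pvRowOr m M k (M.getD a []) =
            (List.range m).foldl (fun row j => if pvMGet M k j then row.set j true else row)
              (M.getD a []) from rfl, hro.2 b]
        simp [hb, hc]
        rfl
      · rw [pvMGet, pv_getD_set_ne _ _ _ _ _ (fun h => hai h.symm)]
        simp [hai, pvMGet]
  · have hcf : pvMGet M i0 k = false := by
      cases h : pvMGet M i0 k
      · rfl
      · exact absurd h hc
    have hMeq : pvFWInnerStep m k M i0 = M := by simp [pvFWInnerStep, hcf]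
    rw [hMeq]
    refine ⟨hM, ?_⟩
    intro a b ha hb
    by_cases hai : a = i0
    · subst hai; rw [hcf]; simp
    · simp [hai]

theorem pvFWRow_fold (m k : Nat) :
    ∀ (L : List Nat) (M : List (List Bool)), pvMatOK m M → (∀ x ∈ L, x < m) → k < m →
    pvMatOK m (L.foldl (pvFWInnerStep m k) M) ∧
    (∀ a b, a < m → b < m →
      pvMGet (L.foldl (pvFWInnerStep m k) M) a b =
        (pvMGet M a b || (decide (a ∈ L) && pvMGet M a k && pvMGet M k b))) := by
  intro L
  induction L with
  | nil => intro M hM _ _; refine ⟨hM, ?_⟩; intro a b _ _; simp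
  | cons i0 L ih =>
    intro M hM hL hk
    have hi0 : i0 < m := hL i0 (by simp)
    obtain ⟨s1, s2⟩ := pvFWInnerStep_char m k M hM i0 hi0
    obtain ⟨g1, g2⟩ := ih (pvFWInnerStep m k M i0) s1 (fun x hx => hL x (by simp [hx])) hk
    rw [List.foldl_cons]
    refine ⟨g1, ?_⟩
    intro a b ha hb
    rw [g2 a b ha hb, s2 a b ha hb, s2 a k ha hk, s2 k b hk hb]
    by_cases h1 : a = i0 <;> by_cases h2 : a ∈ L <;> by_cases h6 : k = i0 <;>
      cases h3 : pvMGet M a b <;> cases h4 : pvMGet M a k <;>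
        cases h5 : pvMGet M k b <;> cases h7 : pvMGet M k k <;>
          simp [h1, h2, h6, h3, h4, h5, h7, List.mem_cons]

theorem pvFW_spec (m : Nat) (M1 : List (List Bool)) (hM1 : pvMatOK m M1) :
    ∀ k, k ≤ m →
    pvMatOK m ((List.range k).foldl (pvFWStep m) M1) ∧
    (∀ a b, a < m → b < m →
      (pvMGet ((List.range k).foldl (pvFWStep m) M1) a b = true ↔
        pvPB (fun a b => pvMGet M1 a b = true) k a b)) := by
  intro k
  induction k with
  | zero =>
    refine fun _ => ⟨by simpa using hM1, ?_⟩
    intro a b _ _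
    rfl
  | succ k ih =>
    intro hk1
    obtain ⟨q1, q2⟩ := ih (by omega)
    have hkm : k < m := by omega
    rw [List.range_succ, List.foldl_append, List.foldl_cons, List.foldl_nil]
    obtain ⟨r1, r2⟩ := pvFWRow_fold m k (List.range m)
      ((List.range k).foldl (pvFWStep m) M1) q1 (by simp) hkm
    refine ⟨r1, ?_⟩
    intro a b ha hb
    rw [show pvFWStep m ((List.range k).foldl (pvFWStep m) M1) k =
        (List.range m).foldl (pvFWInnerStep m k) ((List.range k).foldl (pvFWStep m) M1)
        from rfl]
    rw [r2 a b ha hb]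
    have hmem : decide (a ∈ List.range m) = true := by simp [ha]
    rw [hmem]
    simp only [Bool.true_and, Bool.or_eq_true, Bool.and_eq_true]
    rw [q2 a b ha hb, q2 a k ha hkm, q2 k b hkm hb]
    rfl

-- --- counting helpers ---

theorem pv_known_fold (b1 b2 : Int → Bool) (i : Int) :
    ∀ (S : List Int) (c : Int),
    S.foldl (fun known j => if j ≠ i then
        known + (if b1 j then (1:Int) else 0) + (if b2 j then (1:Int) else 0)
      else known) c =
    c + (S.countP (fun j => decide (j ≠ i) && b1 j) : Int)
      + (S.countP (fun j => decide (j ≠ i) && b2 j) : Int) := by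
  intro S
  induction S with
  | nil => intro c; simp
  | cons j S ih =>
    intro c
    rw [List.foldl_cons, ih, List.countP_cons, List.countP_cons]
    push_cast
    by_cases hj : j = i
    · simp [hj]
    · by_cases h1 : b1 j = true <;> by_cases h2 : b2 j = true <;>
        simp [hj, h1, h2] <;> ring

theorem pv_foldl_congr {α β : Type} :
    ∀ (S : List β) (f g : α → β → α) (c : α),
    (∀ a, ∀ x ∈ S, f a x = g a x) → S.foldl f c = S.foldl g c := by
  intro S
  induction S with
  | nil => intro f g c _; rfl
  | cons x S ih =>
    intro f g c h
    rw [List.foldl_cons, List.foldl_cons, h c x (by simp)]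
    exact ih f g _ (fun a y hy => h a y (by simp [hy]))

-- ===== VERDICT (by name: the statement is the Claim_ definition above) =====
theorem solution_spec : Claim_equal_solution := by
  intro n results _ hpre
  unfold Spec_solution
  by_cases hn : n + 1 ≤ 1
  · simp only [solution, solution_alt, PySem.List.pyRange_one_eq_nil (by omega : n + 1 ≤ 1),
      List.foldl_nil]
  · have hm : 0 < (n+1).toNat := by omega
    have hmi : (((n+1).toNat : Int)) = n + 1 := by omega
    simp only [solution, solution_alt]
    set m := (n + 1).toNat with hmdef
    set S := PySem.List.pyRange 1 (n + 1) 1 with hSdef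
    set adjs := results.foldl pvBuildStep
      ((List.range m).map (fun _ => ([]:List Int)), (List.range m).map (fun _ => ([]:List Int)))
      with hadjs
    set cnts := S.foldl (fun (p : List Int × List Int) i =>
        (pvCountUp m adjs.1 p.1 i, pvCountUp m adjs.2 p.2 i))
      (List.replicate m (0:Int), List.replicate m (0:Int)) with hcntsdef
    set M1 := results.foldl (pvEdgeStep m) ((List.range m).map (fun _ => List.replicate m false))
      with hM1def
    set Mc := (List.range m).foldl (pvFWStep m) M1 with hMcdef
    -- membership facts about the source range
    have hSmem : ∀ i ∈ S, 1 ≤ i ∧ i < n + 1 := by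
      intro i hi
      rw [hSdef] at hi
      exact PySem.List.mem_pyRange_one.mp hi
    -- Pre_ bounds, normalized
    have hbnd : ∀ w l : Int, [w, l] ∈ results → pvNIdx m w < m ∧ pvNIdx m l < m := by
      intro w l hmem
      obtain ⟨-, hx⟩ := hpre _ hmem
      have hw := hx w (by simp)
      have hl := hx l (by simp)
      unfold pvNIdx
      constructor <;> split <;> omega
    -- adjacency tables
    obtain ⟨hW1, hL1, hWc0, hLc0⟩ := pvBuild_spec m results
      ((List.range m).map (fun _ => ([]:List Int)), (List.range m).map (fun _ => ([]:List Int)))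
      (by simp) (by simp)
    rw [← hadjs] at hW1 hL1 hWc0 hLc0
    have hWc : ∀ a (v : Int), a < m →
        (v ∈ adjs.1.getD a [] ↔ ∃ w l : Int, [w, l] ∈ results ∧ v = w ∧ pvNIdx m l = a) := by
      intro a v ha
      rw [hWc0 a v ha, pv_getD_const_nil]
      simp
    have hLc : ∀ a (v : Int), a < m →
        (v ∈ adjs.2.getD a [] ↔ ∃ w l : Int, [w, l] ∈ results ∧ v = l ∧ pvNIdx m w = a) := by
      intro a v ha
      rw [hLc0 a v ha, pv_getD_const_nil]
      simp
    have hadjW : ∀ (a : Nat) (v : Int), v ∈ adjs.1.getD a [] → pvNIdx m v < m := by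
      intro a v hv
      rcases Nat.lt_or_ge a m with ha | ha
      · obtain ⟨w, l, hmem, heq, -⟩ := (hWc a v ha).mp hv
        rw [heq]
        exact (hbnd w l hmem).1
      · rw [pv_getD_ge _ _ _ (by rw [hW1]; exact ha)] at hv
        cases hv
    have hadjL : ∀ (a : Nat) (v : Int), v ∈ adjs.2.getD a [] → pvNIdx m v < m := by
      intro a v hv
      rcases Nat.lt_or_ge a m with ha | ha
      · obtain ⟨w, l, hmem, heq, -⟩ := (hLc a v ha).mp hv
        rw [heq]
        exact (hbnd w l hmem).2
      · rw [pv_getD_ge _ _ _ (by rw [hL1]; exact ha)] at hv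
        cases hv
    -- edge-relation glue
    have hEW : ∀ a b, pvEAdj m adjs.1 a b ↔ pvE m results b a := by
      intro a b
      rcases Nat.lt_or_ge a m with ha | ha
      · constructor
        · rintro ⟨v, hv, rfl⟩
          obtain ⟨w, l, hmem, heq, hla⟩ := (hWc a v ha).mp hv
          exact ⟨w, l, hmem, by rw [heq], hla⟩
        · rintro ⟨w, l, hmem, rfl, hla⟩
          exact ⟨w, (hWc a w ha).mpr ⟨w, l, hmem, rfl, hla⟩, rfl⟩
      · constructor
        · rintro ⟨v, hv, rfl⟩
          rw [pv_getD_ge _ _ _ (by rw [hW1]; exact ha)] at hv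
          cases hv
        · rintro ⟨w, l, hmem, rfl, hla⟩
          exact absurd (hla ▸ (hbnd w l hmem).2) (by omega)
    have hEL : ∀ a b, pvEAdj m adjs.2 a b ↔ pvE m results a b := by
      intro a b
      rcases Nat.lt_or_ge a m with ha | ha
      · constructor
        · rintro ⟨v, hv, rfl⟩
          obtain ⟨w, l, hmem, heq, hwa⟩ := (hLc a v ha).mp hv
          exact ⟨w, l, hmem, hwa, by rw [heq]⟩
        · rintro ⟨w, l, hmem, hwa, rfl⟩
          exact ⟨l, (hLc a l ha).mpr ⟨w, l, hmem, rfl, hwa⟩, rfl⟩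
      · constructor
        · rintro ⟨v, hv, rfl⟩
          rw [pv_getD_ge _ _ _ (by rw [hL1]; exact ha)] at hv
          cases hv
        · rintro ⟨w, l, hmem, hwa, rfl⟩
          exact absurd (hwa ▸ (hbnd w l hmem).1) (by omega)
    -- counters
    obtain ⟨-, -, hcnts⟩ := pvSrcFold_spec m adjs.1 adjs.2 hadjW hadjL S
      (List.replicate m (0:Int)) (List.replicate m (0:Int)) (by simp) (by simp)
      (by intro i hi; obtain ⟨h1, h2⟩ := hSmem i hi; omega)
    rw [← hcntsdef] at hcnts
    -- B matrix characterisation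
    obtain ⟨hM1OK, hM1c0⟩ := pvEdge_spec m results _ (pvM0_matOK m)
    rw [← hM1def] at hM1OK hM1c0
    have hE0 : ∀ a b, (pvMGet M1 a b = true) ↔ pvE m results a b := by
      intro a b
      rcases Nat.lt_or_ge a m with ha | ha
      · rcases Nat.lt_or_ge b m with hb | hb
        · rw [hM1c0 a b ha hb, pvM0_get]
          simp
        · constructor
          · intro h
            have hrow : M1.getD a [] ∈ M1 := by
              have hlt : a < M1.length := by rw [hM1OK.1]; exact ha
              rw [List.getD_eq_getElem?_getD, List.getElem?_eq_getElem hlt]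
              simp only [Option.getD_some]
              exact List.getElem_mem hlt
            rw [pvMGet, pv_getD_ge _ _ _ (by rw [hM1OK.2 _ hrow]; exact hb)] at h
            cases h
          · rintro ⟨w, l, hmem, hwa, hlb⟩
            exact absurd (hlb ▸ (hbnd w l hmem).2) (by omega)
      · constructor
        · intro h
          rw [pvMGet, pv_getD_ge M1 a [] (by rw [hM1OK.1]; exact ha)] at h
          simp at h
        · rintro ⟨w, l, hmem, hwa, hlb⟩
          exact absurd (hwa ▸ (hbnd w l hmem).1) (by omega)
    obtain ⟨-, hMcc⟩ := pvFW_spec m M1 hM1OK m le_rfl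
    rw [← hMcdef] at hMcc
    have hMcr : ∀ a b, a < m → b < m →
        (pvMGet Mc a b = true ↔ pvPB (pvE m results) m a b) := by
      intro a b ha hb
      rw [hMcc a b ha hb]
      exact pvPB_congr hE0 m a b
    -- per-source value equality
    have hval : ∀ i ∈ S,
        cnts.1.getD (pvNIdx m i) 0 + cnts.2.getD (pvNIdx m i) 0 =
        S.foldl (fun known j => if j ≠ i then
            known + (if pvMGet Mc (pvNIdx m i) (pvNIdx m j) then (1:Int) else 0)
                  + (if pvMGet Mc (pvNIdx m j) (pvNIdx m i) then (1:Int) else 0)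
          else known) 0 := by
      intro i hi
      obtain ⟨hi1, hi2⟩ := hSmem i hi
      have hii : pvNIdx m i = i.toNat := by
        unfold pvNIdx
        split <;> omega
      have him : pvNIdx m i < m := by rw [hii]; omega
      obtain ⟨e1, e2⟩ := hcnts (pvNIdx m i) him
      rw [e1, e2, List.getD_replicate _ him]
      rw [pv_known_fold]
      have hc1 : S.countP (fun j => pvReach m adjs.1 j.toNat (pvNIdx m i) && !(pvNIdx m i == j.toNat)) =
          S.countP (fun j => decide (j ≠ i) && pvMGet Mc (pvNIdx m i) (pvNIdx m j)) := by
        refine List.countP_congr ?_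
        intro j hj
        obtain ⟨hj1, hj2⟩ := hSmem j hj
        have hjj : pvNIdx m j = j.toNat := by unfold pvNIdx; split <;> omega
        have hjm : pvNIdx m j < m := by rw [hjj]; omega
        simp only [Bool.and_eq_true, decide_eq_true_eq, Bool.not_eq_eq_eq_not, Bool.not_true,
          beq_eq_false_iff_ne, ne_eq]
        rw [pvReach_iff, ← hjj, hMcr _ _ him hjm]
        have hflip : pvPB (pvEAdj m adjs.1) m (pvNIdx m j) (pvNIdx m i) ↔
            pvPB (pvE m results) m (pvNIdx m i) (pvNIdx m j) := by
          rw [pvPB_congr hEW m _ _]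
          exact pvPB_flip (pvE m results) m _ _
        rw [hflip]
        constructor
        · rintro ⟨h1, h2⟩
          exact ⟨by omega, h1⟩
        · rintro ⟨h1, h2⟩
          exact ⟨h2, by omega⟩
      have hc2 : S.countP (fun j => pvReach m adjs.2 j.toNat (pvNIdx m i) && !(pvNIdx m i == j.toNat)) =
          S.countP (fun j => decide (j ≠ i) && pvMGet Mc (pvNIdx m j) (pvNIdx m i)) := by
        refine List.countP_congr ?_
        intro j hj
        obtain ⟨hj1, hj2⟩ := hSmem j hj
        have hjj : pvNIdx m j = j.toNat := by unfold pvNIdx; split <;> omega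
        have hjm : pvNIdx m j < m := by rw [hjj]; omega
        simp only [Bool.and_eq_true, decide_eq_true_eq, Bool.not_eq_eq_eq_not, Bool.not_true,
          beq_eq_false_iff_ne, ne_eq]
        rw [pvReach_iff, ← hjj, hMcr _ _ hjm him]
        rw [pvPB_congr hEL m _ _]
        constructor
        · rintro ⟨h1, h2⟩
          exact ⟨by omega, h1⟩
        · rintro ⟨h1, h2⟩
          exact ⟨h2, by omega⟩
      rw [hc1, hc2]
      ring
    -- both programs count the same sources
    refine pv_foldl_congr S _ _ 0 ?_
    intro acc i hi
    rw [hval i hi]
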